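-- pv_equiv track=rewrite | github.com/yqi3/SensitivitySurrogacy | python/sensitivity_surrogacy/nuisance_partial_id.py | _sjt_permutations
-- ===== SOURCE A (Python) =====
-- def _sjt_permutations(seq):
--     """
--     Steinhaus-Johnson-Trotter permutation generation.
--     Matches the ordering produced by R's combinat::permn().
--     """
--     seq = list(seq)
--     n = len(seq)
--     if n == 0:
--         return [()]
--     if n == 1:
--         return [tuple(seq)]
--
--     # Recursively generate permutations of seq[:-1]
--     last = seq[-1]
--     sub_perms = _sjt_permutations(seq[:-1])
--     result = []
--
--     for i, perm in enumerate(sub_perms):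
--         perm = list(perm)
--         # Even-indexed sub-permutations: insert right to left
--         # Odd-indexed sub-permutations: insert left to right
--         if i % 2 == 0:
--             positions = range(len(perm), -1, -1)
--         else:
--             positions = range(0, len(perm) + 1)
--         for pos in positions:
--             new_perm = perm[:pos] + [last] + perm[pos:]
--             result.append(tuple(new_perm))
--
--     return result
-- ===== SOURCE B (Python) =====
-- def _sjt_permutations(seq):
--     """Direct unranking: permutation #k is computed from the factorial-base
--     digits of k (zig-zag insertion positions); no intermediate levels kept."""
--     seq = list(seq)
--     n = len(seq)
--     if n == 0:
--         return [()]
--     total = 1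
--     for m in range(2, n + 1):
--         total *= m
--     out = []
--     for k in range(total):
--         km = k
--         rs = []
--         for m in range(n, 1, -1):
--             km, r = divmod(km, m)
--             rs.append((km, r))
--         perm = [seq[0]]
--         m = 2
--         for i, r in reversed(rs):
--             pos = (m - 1 - r) if i % 2 == 0 else r
--             perm.insert(pos, seq[m - 1])
--             m += 1
--         out.append(tuple(perm))
--     return out
-- ===== Notes on version B (the rewrite author's own statement) =====
-- stated objective: alternative
-- what changed: A builds all permutations recursively level by level (generate all (n-1)-permutations, then splice the last element into every position in alternating direction); B generates no intermediate levels at all: it unranks each index k in range(n!) directly from the factorial-base digits of k, computing each permutation's zig-zag insertion positions by divmod arithmetic.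
import Mathlib
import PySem

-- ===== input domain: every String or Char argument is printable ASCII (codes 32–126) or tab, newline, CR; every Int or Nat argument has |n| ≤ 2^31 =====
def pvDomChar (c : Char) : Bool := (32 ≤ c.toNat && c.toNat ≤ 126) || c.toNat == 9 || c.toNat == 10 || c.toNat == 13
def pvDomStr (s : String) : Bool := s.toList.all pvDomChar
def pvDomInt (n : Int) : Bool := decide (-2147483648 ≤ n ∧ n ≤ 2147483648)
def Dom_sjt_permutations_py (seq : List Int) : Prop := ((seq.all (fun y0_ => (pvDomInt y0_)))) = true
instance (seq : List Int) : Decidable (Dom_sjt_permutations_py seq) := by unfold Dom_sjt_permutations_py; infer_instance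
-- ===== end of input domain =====

-- B replaces A's recursive level-by-level generation by direct unranking: permutation #k is
-- computed from the factorial-base digits of k (zig-zag insertion positions); objective: alternative.


-- ===== PORT A =====
-- Literal port of A: recursion on seq[:-1], then zig-zag insertion of the last element
-- into each sub-permutation (even sub-index: positions right-to-left, odd: left-to-right).
def sjt_permutations_py (seq : List Int) : List (List Int) :=
  if seq.length = 0 then [[]]
  else if seq.length = 1 then [seq]
  else
    let lastv := PySem.List.pyGetD seq (-1) 0
    let sub := sjt_permutations_py seq.dropLast
    (PySem.List.enumerate sub).foldl (fun result ip =>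
      let positions : List Int :=
        if PySem.Int.mod ip.1 2 = 0 then PySem.List.pyRange ((ip.2.length : Int)) (-1) (-1)
        else PySem.List.pyRange 0 ((ip.2.length : Int) + 1) 1
      positions.foldl (fun res pos =>
        res ++ [PySem.List.slice ip.2 none (some pos) ++ [lastv] ++ PySem.List.slice ip.2 (some pos) none]) result) []
termination_by seq.length
decreasing_by simp [List.length_dropLast]; omega

-- ===== PORT B =====
-- Literal port of B (Source B): for each k < n!, divmod-chain k down (m = n..2) collecting
-- (quotient, remainder) pairs, then rebuild permutation #k by inserting seq[m-1] (m = 2..n).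
def sjt_permutations_py_alt (seq : List Int) : List (List Int) :=
  let n := seq.length
  if n = 0 then [[]]
  else
    let total := (PySem.List.pyRange 2 ((n : Int) + 1) 1).foldl (fun t m => t * m) 1
    (PySem.List.pyRange 0 total 1).foldl (fun out k =>
      let rs := ((PySem.List.pyRange (n : Int) 1 (-1)).foldl (fun (st : Int × List (Int × Int)) m =>
          let km := PySem.Int.floordiv st.1 m
          let r := PySem.Int.mod st.1 m
          (km, st.2 ++ [(km, r)])) (k, [])).2
      let perm := (rs.reverse.foldl (fun (st : Int × List Int) ir =>
          let pos := if PySem.Int.mod ir.1 2 = 0 then st.1 - 1 - ir.2 else ir.2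
          (st.1 + 1, PySem.List.insert st.2 pos (PySem.List.pyGetD seq (st.1 - 1) 0)))
          (2, [PySem.List.pyGetD seq 0 0])).2
      out ++ [perm]) []

-- ===== PRECONDITION & SPEC =====
def Spec_sjt_permutations_py (seq : List Int) (out : List (List Int)) : Prop := out = sjt_permutations_py_alt seq
instance (seq : List Int) (out : List (List Int)) : Decidable (Spec_sjt_permutations_py seq out) := by unfold Spec_sjt_permutations_py; infer_instance

-- ===== CLAIM (what is proved, stated in full; the proofs are below) =====
def Claim_equal_sjt_permutations_py : Prop := ∀ (seq : List Int), Dom_sjt_permutations_py seq → Spec_sjt_permutations_py seq (sjt_permutations_py seq)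

-- ===== LEMMAS AND PROOFS =====
-- proof-side spec: insertion at position p (both ports insert only with p <= len)
def pvIns (p : Nat) (x : Int) (l : List Int) : List Int := l.take p ++ x :: l.drop p

-- proof-side spec: unranking along the reversed sequence (common characterisation of both ports)
def pvUnrank : List Int → Nat → List Int
  | [], _ => []
  | [x], _ => [x]
  | x :: y :: ys, k =>
      let n := ys.length + 2
      let i := k / n
      let r := k % n
      pvIns (if i % 2 = 0 then n - 1 - r else r) x (pvUnrank (y :: ys) i)

theorem pvIns_length (p : Nat) (x : Int) (l : List Int) : (pvIns p x l).length = l.length + 1 := by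
  simp [pvIns]

theorem pvUnrank_length (t : List Int) (k : Nat) (ht : t ≠ []) : (pvUnrank t k).length = t.length := by
  induction t generalizing k with
  | nil => simp at ht
  | cons x ys ih =>
      cases ys with
      | nil => simp [pvUnrank]
      | cons y zs =>
          simp only [pvUnrank, pvIns_length, ih (k / (zs.length + 2)) (by simp)]
          simp

theorem pvMerge {n : Nat} (hn : 0 < n) (T : Nat) (w : Nat → Nat → List Int) :
    (List.range T).flatMap (fun i => (List.range n).map (w i)) =
    (List.range (T * n)).map (fun k => w (k / n) (k % n)) := by
  induction T with
  | zero => simp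
  | succ T ih =>
      rw [List.range_succ, List.flatMap_append, ih, Nat.succ_mul, List.range_add, List.map_append]
      simp only [List.flatMap_cons, List.flatMap_nil, List.append_nil, List.map_map]
      congr 1
      apply List.map_congr_left
      intro r hr
      simp only [List.mem_range] at hr
      have h1 : (T * n + r) / n = T := by
        rw [mul_comm, Nat.mul_add_div hn, Nat.div_eq_of_lt hr]; omega
      have h2 : (T * n + r) % n = r := by
        rw [mul_comm, Nat.mul_add_mod, Nat.mod_eq_of_lt hr]
      simp [Function.comp, h1, h2]

theorem pvEnum (T : Nat) (u : Nat → List Int) :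
    PySem.List.enumerate ((List.range T).map u) 0 = (List.range T).map (fun (i : Nat) => ((i : Int), u i)) := by
  apply List.ext_getElem
  · simp [PySem.List.length_enumerate]
  · intro k h1 h2
    rw [PySem.List.getElem_enumerate]
    simp

theorem pvGetLast (l : List Int) (x : Int) : PySem.List.pyGetD (l ++ [x]) (-1) 0 = x := by
  simp [PySem.List.pyGetD, PySem.List.pyGet?, PySem.List.pyIdx?]

theorem pvA_step (l : List Int) (x : Int) (hl : l ≠ []) :
    sjt_permutations_py (l ++ [x]) =
      (PySem.List.enumerate (sjt_permutations_py l)).foldl (fun result ip =>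
        (if PySem.Int.mod ip.1 2 = 0 then PySem.List.pyRange ((ip.2.length : Int)) (-1) (-1)
         else PySem.List.pyRange 0 ((ip.2.length : Int) + 1) 1).foldl (fun res pos =>
          res ++ [PySem.List.slice ip.2 none (some pos) ++ [x] ++ PySem.List.slice ip.2 (some pos) none]) result) [] := by
  rw [sjt_permutations_py, if_neg (by simp), if_neg (by simp [hl]), List.dropLast_concat, pvGetLast]

theorem pvA_eq (t : List Int) (ht : t ≠ []) :
    sjt_permutations_py t.reverse = (List.range (Nat.factorial t.length)).map (pvUnrank t) := by
  induction t with
  | nil => simp at ht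
  | cons x u ih =>
    cases u with
    | nil => simp [sjt_permutations_py, pvUnrank]
    | cons y ys =>
      have hrev : (x :: y :: ys).reverse = (y :: ys).reverse ++ [x] := by simp
      rw [hrev, pvA_step _ _ (by simp), ih (by simp), pvEnum]
      simp only [PySem.List.foldl_append_singleton_eq_map, PySem.List.foldl_append_eq_flatMap,
        List.nil_append, List.flatMap_map]
      have hblock : ∀ i : Nat,
          ((if PySem.Int.mod ((i : Int)) 2 = 0
            then PySem.List.pyRange (((pvUnrank (y :: ys) i).length : Int)) (-1) (-1)
            else PySem.List.pyRange 0 (((pvUnrank (y :: ys) i).length : Int) + 1) 1).map (fun pos =>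
              PySem.List.slice (pvUnrank (y :: ys) i) none (some pos) ++ [x] ++
              PySem.List.slice (pvUnrank (y :: ys) i) (some pos) none)) =
          (List.range ((y :: ys).length + 1)).map (fun r =>
            pvIns (if i % 2 = 0 then (y :: ys).length - r else r) x (pvUnrank (y :: ys) i)) := by
        intro i
        have hlen : (pvUnrank (y :: ys) i).length = (y :: ys).length := pvUnrank_length _ _ (by simp)
        have hmod : PySem.Int.mod ((i : Int)) 2 = ((i % 2 : Nat) : Int) := by
          exact_mod_cast PySem.Int.mod_natCast i 2
        by_cases hi : i % 2 = 0
        · rw [if_pos (by rw [hmod, hi]; rfl), hlen, PySem.List.pyRange_neg_one, List.map_map,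
            show (((y :: ys).length : Int) - (-1)).toNat = (y :: ys).length + 1 by omega]
          apply List.map_congr_left
          intro r hr
          simp only [List.mem_range] at hr
          simp only [Function.comp]
          rw [PySem.List.slice_to _ (by omega), PySem.List.slice_from _ (by omega),
            show ((((y :: ys).length : Int)) - (r : Int)).toNat = (y :: ys).length - r by omega]
          simp [pvIns, hi]
        · rw [if_neg (by rw [hmod]; intro h; exact hi (by exact_mod_cast h)), hlen,
            show (((y :: ys).length : Int) + 1) = (((y :: ys).length + 1 : Nat) : Int) by push_cast; ring,
            PySem.List.pyRange_zero_nat, List.map_map]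
          apply List.map_congr_left
          intro r hr
          simp only [List.mem_range] at hr
          simp only [Function.comp]
          rw [PySem.List.slice_to _ (by omega), PySem.List.slice_from _ (by omega),
            Int.toNat_natCast]
          simp [pvIns, hi]
      simp only [hblock]
      rw [pvMerge (by omega)]
      have hfac : (x :: y :: ys).length.factorial = (y :: ys).length.factorial * ((y :: ys).length + 1) := by
        simp [List.length_cons, Nat.factorial_succ, Nat.mul_comm]
      rw [hfac]
      apply List.map_congr_left
      intro k _
      simp [pvUnrank]

def pvChain : Int → List Int → List (Int × Int)
  | _, [] => []
  | k, m :: ms => (PySem.Int.floordiv k m, PySem.Int.mod k m) :: pvChain (PySem.Int.floordiv k m) ms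

theorem pvChain_foldl (L : List Int) (k : Int) (acc : List (Int × Int)) :
    (L.foldl (fun (st : Int × List (Int × Int)) m =>
      (PySem.Int.floordiv st.1 m, st.2 ++ [(PySem.Int.floordiv st.1 m, PySem.Int.mod st.1 m)])) (k, acc)).2
    = acc ++ pvChain k L := by
  induction L generalizing k acc with
  | nil => simp [pvChain]
  | cons m ms ih => simp [pvChain, ih]

theorem pvTotal (n : Nat) :
    (PySem.List.pyRange 2 ((n : Int) + 1) 1).foldl (fun t m => t * m) 1 = (Nat.factorial n : Int) := by
  induction n with
  | zero => rw [PySem.List.pyRange_one_eq_nil (by omega)]; rfl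
  | succ n ih =>
      cases n with
      | zero => rw [PySem.List.pyRange_one_eq_nil (by omega)]; rfl
      | succ p =>
          rw [show (((p + 1 + 1 : Nat) : Int) + 1) = (((p + 1 : Nat) : Int) + 1) + 1 by push_cast; ring,
            PySem.List.pyRange_one_succ_right (by push_cast; omega), List.foldl_append, ih]
          simp only [List.foldl_cons, List.foldl_nil]
          push_cast [Nat.factorial_succ]
          ring

theorem pvGetMid (l : List Int) (x : Int) (r : List Int) (d : Int) :
    ((l ++ [x]) ++ r).getD l.length d = x := by
  simp [List.getD_eq_getElem?_getD]

theorem pvFoldr (u : List Int) (hu : u ≠ []) (seq : List Int) (hpre : u.reverse <+: seq) (k : Nat) :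
    (pvChain (k : Int) (PySem.List.pyRange (u.length : Int) 1 (-1))).foldr
      (fun ir st => (st.1 + 1, PySem.List.insert st.2
        (if PySem.Int.mod ir.1 2 = 0 then st.1 - 1 - ir.2 else ir.2) (PySem.List.pyGetD seq (st.1 - 1) 0)))
      (2, [PySem.List.pyGetD seq 0 0])
    = (((u.length : Int) + 1), pvUnrank u k) := by
  induction u generalizing k with
  | nil => simp at hu
  | cons x ys ih =>
    cases ys with
    | nil =>
        rw [PySem.List.pyRange_neg_one_eq_nil (by simp)]
        obtain ⟨rest, hseq⟩ := hpre
        simp at hseq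
        subst hseq
        simp [pvChain, pvUnrank]
    | cons y zs =>
        have hn : ((x :: y :: zs).length : Int) = ((y :: zs).length : Int) + 1 := by push_cast [List.length_cons]; ring
        rw [hn, PySem.List.pyRange_neg_one_cons (a := ((y :: zs).length : Int) + 1) (b := 1)
          (by push_cast [List.length_cons]; omega), add_sub_cancel_right]
        obtain ⟨rest, hseq⟩ := hpre
        have hseq' : seq = ((y :: zs).reverse ++ [x]) ++ rest := by rw [← hseq]; simp
        have hpre' : (y :: zs).reverse <+: seq := by rw [hseq']; exact ⟨[x] ++ rest, by simp⟩
        have hchain : pvChain (k : Int) ((((y :: zs).length : Int) + 1) :: PySem.List.pyRange ((y :: zs).length : Int) 1 (-1))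
            = (((k / (zs.length + 2) : Nat) : Int), ((k % (zs.length + 2) : Nat) : Int)) ::
              pvChain ((k / (zs.length + 2) : Nat) : Int) (PySem.List.pyRange ((y :: zs).length : Int) 1 (-1)) := by
          rw [pvChain, show (((y :: zs).length : Int) + 1) = (((zs.length + 2 : Nat) : Nat) : Int) by push_cast [List.length_cons]; ring,
            PySem.Int.floordiv_natCast, PySem.Int.mod_natCast]
        rw [hchain, List.foldr_cons, ih (by simp) hpre']
        have hmod : PySem.Int.mod ((( k / (zs.length + 2) : Nat) : Int)) 2 = (((k / (zs.length + 2)) % 2 : Nat) : Int) := by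
          exact_mod_cast PySem.Int.mod_natCast _ 2
        have hget : PySem.List.pyGetD seq ((((y :: zs).length : Int) + 1) - 1) 0 = x := by
          rw [add_sub_cancel_right, show (((y :: zs).length : Int)) = (((y :: zs).reverse.length : Nat) : Int) by simp,
            PySem.List.pyGetD_natCast, hseq', pvGetMid]
        simp only [hget, hmod]
        have hlen2 : (pvUnrank (y :: zs) (k / (zs.length + 2))).length = (y :: zs).length :=
          pvUnrank_length _ _ (by simp)
        have hr : k % (zs.length + 2) ≤ zs.length + 1 :=
          Nat.lt_succ_iff.mp (Nat.mod_lt k (by omega))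
        by_cases hi : (k / (zs.length + 2)) % 2 = 0
        · rw [if_pos (by rw [hi]; rfl)]
          rw [show (((y :: zs).length : Int) + 1 - 1 - ((k % (zs.length + 2) : Nat) : Int))
              = (((zs.length + 1 - k % (zs.length + 2) : Nat) : Int)) by push_cast [List.length_cons, hr]; ring]
          rw [PySem.List.insert_natCast _ _ _ (by rw [hlen2]; simp)]
          simp only [Prod.mk.injEq]
          refine ⟨(by push_cast; try ring), ?_⟩
          simp only [pvUnrank, pvIns]
          rw [if_pos hi, show zs.length + 2 - 1 = zs.length + 1 from by omega]
        · rw [if_neg (by intro h; exact hi (by exact_mod_cast h))]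
          rw [PySem.List.insert_natCast _ _ _ (by rw [hlen2]; simpa using hr)]
          simp only [Prod.mk.injEq]
          refine ⟨(by push_cast; try ring), ?_⟩
          simp only [pvUnrank, pvIns]
          rw [if_neg hi]

theorem pvB_step (seq : List Int) (hs : seq ≠ []) :
    sjt_permutations_py_alt seq =
      (PySem.List.pyRange 0 ((PySem.List.pyRange 2 ((seq.length : Int) + 1) 1).foldl (fun t m => t * m) 1) 1).foldl
        (fun out k => out ++
          [(((PySem.List.pyRange (seq.length : Int) 1 (-1)).foldl (fun (st : Int × List (Int × Int)) m =>
                (PySem.Int.floordiv st.1 m, st.2 ++ [(PySem.Int.floordiv st.1 m, PySem.Int.mod st.1 m)]))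
                (k, ([] : List (Int × Int)))).2.reverse.foldl
              (fun (st : Int × List Int) ir =>
                (st.1 + 1, PySem.List.insert st.2 (if PySem.Int.mod ir.1 2 = 0 then st.1 - 1 - ir.2 else ir.2)
                  (PySem.List.pyGetD seq (st.1 - 1) 0)))
              (2, [PySem.List.pyGetD seq 0 0])).2]) [] := by
  rw [sjt_permutations_py_alt.eq_def, if_neg (by simpa using hs)]

theorem pvB_eq (t : List Int) (ht : t ≠ []) :
    sjt_permutations_py_alt t.reverse = (List.range (Nat.factorial t.length)).map (pvUnrank t) := by
  rw [pvB_step _ (by simpa using ht)]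
  rw [show (t.reverse.length : Int) = (t.length : Int) by simp]
  rw [pvTotal, PySem.List.pyRange_zero_nat]
  simp only [PySem.List.foldl_append_singleton_eq_map, List.nil_append, List.map_map]
  apply List.map_congr_left
  intro k _
  simp only [Function.comp]
  rw [pvChain_foldl, List.nil_append]
  simp only [List.foldl_reverse]
  rw [pvFoldr t ht t.reverse List.prefix_rfl k]

-- ===== VERDICT (by name: the statement is the Claim_ definition above) =====
theorem sjt_permutations_py_spec : Claim_equal_sjt_permutations_py := by
  intro seq _
  unfold Spec_sjt_permutations_py
  cases hs : seq.reverse with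
  | nil =>
      simp at hs; subst hs
      simp [sjt_permutations_py, sjt_permutations_py_alt]
  | cons a l =>
      have hne : seq.reverse ≠ [] := by simp [hs]
      have h := (pvA_eq seq.reverse (by simp; intro h; simp [h] at hs)).trans
        (pvB_eq seq.reverse (by simp; intro h; simp [h] at hs)).symm
      simpa using h
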